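-- pv_equiv track=rewrite | github.com/pypi-data/pypi-mirror-401 | packages/mapify-cli/mapify_cli-2.3.0-py3-none-any.whl/mapify_cli/__init__.py | create_task_decomposer_content
-- ===== SOURCE A (Python) =====
-- from typing import Optional, List, Dict, Any
--
-- def create_task_decomposer_content(mcp_servers: List[str]) -> str:
--     """Create task-decomposer agent content"""
--     mcp_section = ""
--     if any(
--         s in mcp_servers
--         for s in ["cipher", "sequential-thinking", "deepwiki", "context7"]
--     ):
--         mcp_section = """
-- ## MCP Integration
--
-- **ALWAYS use these MCP tools:**
-- """
--         if "cipher" in mcp_servers: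
--             mcp_section += """
-- 1. **mcp__cipher__cipher_memory_search** - Search for similar features/patterns
--    - Query: "feature implementation [feature_name]"
--    - Query: "task decomposition [similar_goal]"
-- """
--         if "sequential-thinking" in mcp_servers:
--             mcp_section += """
-- 2. **mcp__sequential-thinking__sequentialthinking** - For complex planning
--    - Use when goal is ambiguous or has many dependencies
-- """
--         if "deepwiki" in mcp_servers:
--             mcp_section += """
-- 3. **mcp__deepwiki__ask_question** - Get insights from GitHub repositories
--    - Ask: "How does [repo] implement [feature]?"
-- """
--         if "context7" in mcp_servers:
--             mcp_section += """
-- 4. **mcp__context7__get-library-docs** - Get up-to-date library documentation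
--    - First use resolve-library-id to find the library
-- """
--
--     return f"""---
-- name: task-decomposer
-- description: Breaks complex goals into atomic, testable subtasks (MAP)
-- tools: Read, Grep, Glob
-- model: sonnet
-- ---
--
-- # Role: Task Decomposition Specialist (MAP)
--
-- You are a software architect who turns high-level feature goals into clear, atomic, testable subtasks with explicit dependencies and acceptance criteria.
-- {mcp_section}
-- ## Responsibilities
--
-- - Analyze the goal and repository context
-- - Identify prerequisites and dependencies
-- - Produce a logically ordered list of atomic subtasks
-- - Include affected files, risks, and acceptance criteria
--
-- ## Output Format (JSON only)
--
-- Return a valid JSON document with subtasks, dependencies, and acceptance criteria.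
-- """
-- ===== SOURCE B (Python) =====
-- from typing import List
--
-- _HEADER = "\n## MCP Integration\n\n**ALWAYS use these MCP tools:**\n"
--
-- _BIT = {"cipher": 1, "sequential-thinking": 2, "deepwiki": 4, "context7": 8}
--
-- _CIPHER = """
-- 1. **mcp__cipher__cipher_memory_search** - Search for similar features/patterns
--    - Query: "feature implementation [feature_name]"
--    - Query: "task decomposition [similar_goal]"
-- """
-- _SEQ = """
-- 2. **mcp__sequential-thinking__sequentialthinking** - For complex planning
--    - Use when goal is ambiguous or has many dependencies
-- """
-- _DEEP = """
-- 3. **mcp__deepwiki__ask_question** - Get insights from GitHub repositories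
--    - Ask: "How does [repo] implement [feature]?"
-- """
-- _CTX = """
-- 4. **mcp__context7__get-library-docs** - Get up-to-date library documentation
--    - First use resolve-library-id to find the library
-- """
--
--
-- def _section(mask: int) -> str:
--     if mask == 0:
--         return ""
--     return (
--         _HEADER
--         + (_CIPHER if mask & 1 else "")
--         + (_SEQ if mask & 2 else "")
--         + (_DEEP if mask & 4 else "")
--         + (_CTX if mask & 8 else "")
--     )
--
--
-- # all 16 possible MCP sections, precomputed once at import time
-- _SECTIONS = [_section(m) for m in range(16)]
--
--
-- def create_task_decomposer_content(mcp_servers: List[str]) -> str: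
--     """Create task-decomposer agent content"""
--     mask = 0
--     for s in mcp_servers:
--         mask |= _BIT.get(s, 0)
--     return f"""---
-- name: task-decomposer
-- description: Breaks complex goals into atomic, testable subtasks (MAP)
-- tools: Read, Grep, Glob
-- model: sonnet
-- ---
--
-- # Role: Task Decomposition Specialist (MAP)
--
-- You are a software architect who turns high-level feature goals into clear, atomic, testable subtasks with explicit dependencies and acceptance criteria.
-- {_SECTIONS[mask]}
-- ## Responsibilities
--
-- - Analyze the goal and repository context
-- - Identify prerequisites and dependencies
-- - Produce a logically ordered list of atomic subtasks
-- - Include affected files, risks, and acceptance criteria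
--
-- ## Output Format (JSON only)
--
-- Return a valid JSON document with subtasks, dependencies, and acceptance criteria.
-- """
-- ===== Notes on version B (the rewrite author's own statement) =====
-- stated objective: alternative
-- what changed: A scans mcp_servers with five separate membership tests and appends hard-coded blocks branch by branch; B makes one pass over the input OR-ing per-server bits into a 4-bit mask and returns a section looked up in a table of all 16 possible sections precomputed at import time.
import Mathlib
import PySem

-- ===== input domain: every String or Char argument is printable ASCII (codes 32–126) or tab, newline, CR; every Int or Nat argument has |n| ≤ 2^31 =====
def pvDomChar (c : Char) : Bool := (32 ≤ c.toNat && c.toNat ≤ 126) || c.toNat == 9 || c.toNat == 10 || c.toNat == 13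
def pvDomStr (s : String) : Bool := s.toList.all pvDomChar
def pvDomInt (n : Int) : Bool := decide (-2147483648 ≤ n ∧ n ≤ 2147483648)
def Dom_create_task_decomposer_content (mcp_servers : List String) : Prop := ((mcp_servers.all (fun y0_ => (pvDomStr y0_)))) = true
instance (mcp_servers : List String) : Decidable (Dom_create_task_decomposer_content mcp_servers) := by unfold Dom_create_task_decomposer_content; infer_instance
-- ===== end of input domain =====

-- B replaces A's five membership scans and branch-by-branch appends by one pass
-- over the input building a 4-bit mask, indexing a precomputed table of all 16
-- possible sections (objective: alternative).

-- ===== PORT A =====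
-- the literal text blocks A appends (byte-exact)
def pvHeaderA : String := "\n## MCP Integration\n\n**ALWAYS use these MCP tools:**\n"
def pvCipherA : String := "\n1. **mcp__cipher__cipher_memory_search** - Search for similar features/patterns\n   - Query: \"feature implementation [feature_name]\"\n   - Query: \"task decomposition [similar_goal]\"\n"
def pvSeqA : String := "\n2. **mcp__sequential-thinking__sequentialthinking** - For complex planning\n   - Use when goal is ambiguous or has many dependencies\n"
def pvDeepA : String := "\n3. **mcp__deepwiki__ask_question** - Get insights from GitHub repositories\n   - Ask: \"How does [repo] implement [feature]?\"\n"
def pvCtxA : String := "\n4. **mcp__context7__get-library-docs** - Get up-to-date library documentation\n   - First use resolve-library-id to find the library\n"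
def pvPre : String := "---\nname: task-decomposer\ndescription: Breaks complex goals into atomic, testable subtasks (MAP)\ntools: Read, Grep, Glob\nmodel: sonnet\n---\n\n# Role: Task Decomposition Specialist (MAP)\n\nYou are a software architect who turns high-level feature goals into clear, atomic, testable subtasks with explicit dependencies and acceptance criteria.\n"
def pvPost : String := "\n## Responsibilities\n\n- Analyze the goal and repository context\n- Identify prerequisites and dependencies\n- Produce a logically ordered list of atomic subtasks\n- Include affected files, risks, and acceptance criteria\n\n## Output Format (JSON only)\n\nReturn a valid JSON document with subtasks, dependencies, and acceptance criteria.\n"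

def create_task_decomposer_content (mcp_servers : List String) : String :=
  let mcp_section := ""
  let mcp_section :=
    if (["cipher", "sequential-thinking", "deepwiki", "context7"].any
        (fun s => decide (s ∈ mcp_servers))) then
      let mcp_section := pvHeaderA
      let mcp_section := if "cipher" ∈ mcp_servers then mcp_section ++ pvCipherA else mcp_section
      let mcp_section := if "sequential-thinking" ∈ mcp_servers then mcp_section ++ pvSeqA else mcp_section
      let mcp_section := if "deepwiki" ∈ mcp_servers then mcp_section ++ pvDeepA else mcp_section
      let mcp_section := if "context7" ∈ mcp_servers then mcp_section ++ pvCtxA else mcp_section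
      mcp_section
    else mcp_section
  pvPre ++ mcp_section ++ pvPost

-- ===== PORT B =====
-- _BIT.get(s, 0): bit assigned to each known server name
def pvBitB (s : String) : Nat :=
  if s = "cipher" then 1
  else if s = "sequential-thinking" then 2
  else if s = "deepwiki" then 4
  else if s = "context7" then 8
  else 0

-- _section(mask)
def pvSectionB (mask : Nat) : String :=
  if mask = 0 then ""
  else
    pvHeaderA
      ++ (if mask &&& 1 ≠ 0 then pvCipherA else "")
      ++ (if mask &&& 2 ≠ 0 then pvSeqA else "")
      ++ (if mask &&& 4 ≠ 0 then pvDeepA else "")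
      ++ (if mask &&& 8 ≠ 0 then pvCtxA else "")

-- _SECTIONS: all 16 sections precomputed once
def pvSectionsB : List String := (List.range 16).map pvSectionB

def create_task_decomposer_content_alt (mcp_servers : List String) : String :=
  let mask := mcp_servers.foldl (fun m s => m ||| pvBitB s) 0
  pvPre ++ pvSectionsB[mask]! ++ pvPost

-- ===== PRECONDITION & SPEC =====
def Spec_create_task_decomposer_content (mcp_servers : List String) (out : String) : Prop := out = create_task_decomposer_content_alt mcp_servers
instance (mcp_servers : List String) (out : String) : Decidable (Spec_create_task_decomposer_content mcp_servers out) := by unfold Spec_create_task_decomposer_content; infer_instance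

-- ===== CLAIM =====
def Claim_equal_create_task_decomposer_content : Prop := ∀ (mcp_servers : List String), Dom_create_task_decomposer_content mcp_servers → Spec_create_task_decomposer_content mcp_servers (create_task_decomposer_content mcp_servers)

-- ===== LEMMAS AND PROOFS =====

-- the mask B's fold computes, characterised by the four memberships
def pvMask4 (l : List String) : Nat :=
  (if "cipher" ∈ l then 1 else 0) ||| ((if "sequential-thinking" ∈ l then 2 else 0)
    ||| ((if "deepwiki" ∈ l then 4 else 0) ||| (if "context7" ∈ l then 8 else 0)))

theorem pvBit_or (a s : String) (t : List String) (b : Nat) :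
    (if s = a then b else 0) ||| (if a ∈ t then b else 0) = (if a ∈ s :: t then b else 0) := by
  by_cases h : s = a <;> by_cases m : a ∈ t <;>
    simp [h, m, List.mem_cons, Nat.or_self, Nat.zero_or, Nat.or_zero] <;>
    exact fun hs => absurd hs.symm h

theorem pvBitB_split (s : String) :
    pvBitB s = (if s = "cipher" then 1 else 0) ||| ((if s = "sequential-thinking" then 2 else 0)
      ||| ((if s = "deepwiki" then 4 else 0) ||| (if s = "context7" then 8 else 0))) := by
  unfold pvBitB
  by_cases h1 : s = "cipher" <;> by_cases h2 : s = "sequential-thinking" <;>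
  by_cases h3 : s = "deepwiki" <;> by_cases h4 : s = "context7" <;>
    simp_all

theorem pvFoldl_or_mask (l : List String) (acc : Nat) :
    l.foldl (fun m s => m ||| pvBitB s) acc = acc ||| pvMask4 l := by
  induction l generalizing acc with
  | nil => simp [pvMask4]
  | cons s t ih =>
    rw [List.foldl_cons, ih, Nat.or_assoc]
    congr 1
    rw [pvBitB_split, pvMask4, pvMask4]
    -- interleave the two OR-chains bit by bit (AC rearrangement), then merge per bit
    rw [show ∀ a1 a2 a4 a8 c1 c2 c4 c8 : Nat,
        (a1 ||| (a2 ||| (a4 ||| a8))) ||| (c1 ||| (c2 ||| (c4 ||| c8)))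
          = (a1 ||| c1) ||| ((a2 ||| c2) ||| ((a4 ||| c4) ||| (a8 ||| c8))) from by
      intro a1 a2 a4 a8 c1 c2 c4 c8
      simp only [← Nat.or_assoc]
      simp [Nat.or_comm, Nat.or_left_comm]]
    rw [pvBit_or, pvBit_or, pvBit_or, pvBit_or]

-- ===== VERDICT =====
set_option maxHeartbeats 2000000 in
set_option maxRecDepth 100000 in
theorem create_task_decomposer_content_spec : Claim_equal_create_task_decomposer_content := by
  intro mcp_servers _
  unfold Spec_create_task_decomposer_content create_task_decomposer_content create_task_decomposer_content_alt
  rw [pvFoldl_or_mask]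
  unfold pvMask4
  by_cases h1 : "cipher" ∈ mcp_servers <;>
  by_cases h2 : "sequential-thinking" ∈ mcp_servers <;>
  by_cases h3 : "deepwiki" ∈ mcp_servers <;>
  by_cases h4 : "context7" ∈ mcp_servers <;>
    simp only [h1, h2, h3, h4, List.any_cons, List.any_nil, decide_true, decide_false,
      Bool.or_true, Bool.or_false, if_true, if_false] <;>
    rfl
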